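-- pv_equiv track=rewrite | github.com/Ma2terB1ast3r/HTTP-Header-Scanner | scanner.py | analyseHeaders
-- ===== SOURCE A (Python) =====
-- def analyseHeaders(requiredHeaders, responseHeaders):
--     '''Checks which of the 'requiredHeaders' are in the 'responseHeaders'.
--     '''
--     # Init results object
--     results = {
--         'presentHeaders': {
--         },
--         'missingHeaders':{
--         },
--         'bestPracticeHeaders':{
--         },
--         'notBestPracticeHeaders':{
--         }
--     }
--
--     # If the response headers are in dictionary format (used for config proposal)
--     if type(responseHeaders) == 'dict':
--         # Find the headers that are present in the header
--         presentHeaders = requiredHeaders.keys() & responseHeaders.keys()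
--         for header in presentHeaders:
--             results['presentHeaders'][header] = responseHeaders[header]
--
--         # Find the headers that aren't present
--         missingHeaders = requiredHeaders.keys() - responseHeaders.keys()
--         for header in missingHeaders:
--             results['missingHeaders'][header] = ''
--
--         # Check which of the present headers have the best practice value
--         bestPracticeHeaders = {}
--         for header in presentHeaders:
--             if requiredHeaders[header] == responseHeaders[header]:
--                 results['bestPracticeHeaders'][header] = responseHeaders[header]
--             else:
--                 results['notBestPracticeHeaders'][header] = responseHeaders[header]
--     # If the response headers are in list format (used for disclosure prevention)
--     else:
--         # Find the headers that are present in the header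
--         presentHeaders = requiredHeaders & responseHeaders.keys()
--         for header in presentHeaders:
--             results['presentHeaders'][header] = responseHeaders[header]
--
--         # Find the headers that aren't present
--         missingHeaders = requiredHeaders - responseHeaders.keys()
--         for header in missingHeaders:
--             results['missingHeaders'][header] = ''
--
--     return results
-- ===== SOURCE B (Python) =====
-- def analyseHeaders(requiredHeaders, responseHeaders):
--     '''Checks which of the 'requiredHeaders' are in the 'responseHeaders'.
--     '''
--     results = {
--         'presentHeaders': {},
--         'missingHeaders': {},
--         'bestPracticeHeaders': {},
--         'notBestPracticeHeaders': {}
--     }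
--     # Single pass: route each required header to present or missing directly.
--     for header in requiredHeaders:
--         if header in responseHeaders:
--             results['presentHeaders'][header] = responseHeaders[header]
--         else:
--             results['missingHeaders'][header] = ''
--     return results
-- ===== Notes on version B (the rewrite author's own statement) =====
-- stated objective: simpler
-- what changed: Replaces the two set operations (& and -) and the two separate dict-populating loops with one single pass over requiredHeaders that routes each header to presentHeaders or missingHeaders directly.
import Mathlib
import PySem

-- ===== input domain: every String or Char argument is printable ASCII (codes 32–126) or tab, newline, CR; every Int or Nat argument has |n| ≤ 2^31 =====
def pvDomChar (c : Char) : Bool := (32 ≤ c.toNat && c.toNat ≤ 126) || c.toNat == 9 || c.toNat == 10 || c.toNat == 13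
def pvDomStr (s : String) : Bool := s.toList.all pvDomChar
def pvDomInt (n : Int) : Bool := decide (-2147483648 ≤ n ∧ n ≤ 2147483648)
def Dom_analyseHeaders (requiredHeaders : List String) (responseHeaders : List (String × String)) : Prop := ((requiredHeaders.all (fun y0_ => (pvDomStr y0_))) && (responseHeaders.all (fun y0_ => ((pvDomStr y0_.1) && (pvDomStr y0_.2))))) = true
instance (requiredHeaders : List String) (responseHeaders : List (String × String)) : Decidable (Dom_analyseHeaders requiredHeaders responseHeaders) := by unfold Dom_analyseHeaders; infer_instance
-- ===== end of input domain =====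

-- B replaces A's two set operations and two populating loops with one pass routing each
-- required header to present/missing directly (objective: simpler).
-- `requiredHeaders` is a Python set (distinct elements), so each dict insertion below is a
-- fresh key and is ported exactly as an append; dict lookup is first-match on the assoc list.
-- ===== PORT A =====
def analyseHeaders (requiredHeaders : List String) (responseHeaders : List (String × String)) : List (String × List (String × String)) :=
  -- type(responseHeaders) == 'dict' compares a type to a string: always False, so the else branch runs.
  -- presentHeaders = requiredHeaders & responseHeaders.keys()
  let present := requiredHeaders.filter (fun h => (responseHeaders.map Prod.fst).contains h)
  let presentDict := present.foldl (fun d h => d ++ [(h, ((responseHeaders.lookup h).getD ""))]) []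
  -- missingHeaders = requiredHeaders - responseHeaders.keys()
  let missing := requiredHeaders.filter (fun h => !((responseHeaders.map Prod.fst).contains h))
  let missingDict := missing.foldl (fun d h => d ++ [(h, "")]) []
  [("presentHeaders", presentDict), ("missingHeaders", missingDict),
   ("bestPracticeHeaders", []), ("notBestPracticeHeaders", [])]

-- ===== PORT B =====
def analyseHeaders_alt (requiredHeaders : List String) (responseHeaders : List (String × String)) : List (String × List (String × String)) :=
  let pm := requiredHeaders.foldl
    (fun (s : List (String × String) × List (String × String)) h =>
      match responseHeaders.lookup h with
      | some v => (s.1 ++ [(h, v)], s.2)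
      | none => (s.1, s.2 ++ [(h, "")]))
    ([], [])
  [("presentHeaders", pm.1), ("missingHeaders", pm.2),
   ("bestPracticeHeaders", []), ("notBestPracticeHeaders", [])]

-- ===== PRECONDITION & SPEC =====
def Spec_analyseHeaders (requiredHeaders : List String) (responseHeaders : List (String × String)) (out : List (String × List (String × String))) : Prop := out = analyseHeaders_alt requiredHeaders responseHeaders
instance (requiredHeaders : List String) (responseHeaders : List (String × String)) (out : List (String × List (String × String))) : Decidable (Spec_analyseHeaders requiredHeaders responseHeaders out) := by unfold Spec_analyseHeaders; infer_instance

-- ===== CLAIM (what is proved, stated in full; the proofs are below) =====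
def Claim_equal_analyseHeaders : Prop := ∀ (requiredHeaders : List String) (responseHeaders : List (String × String)), Dom_analyseHeaders requiredHeaders responseHeaders → Spec_analyseHeaders requiredHeaders responseHeaders (analyseHeaders requiredHeaders responseHeaders)

-- ===== LEMMAS AND PROOFS =====

-- membership via the keys list agrees with first-match lookup succeeding
theorem mem_keys_iff_lookup_isSome (resp : List (String × String)) (h : String) :
    h ∈ resp.map Prod.fst ↔ (resp.lookup h).isSome := by
  induction resp with
  | nil => simp [List.lookup]
  | cons p t ih =>
      by_cases hp : p.1 = h
      · simp [List.lookup, hp]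
      · have h1 : (h == p.1) = false := beq_eq_false_iff_ne.mpr (Ne.symm hp)
        simp only [List.map_cons, List.mem_cons, List.lookup, h1]
        simp [Ne.symm hp, ih]

-- B's single fold equals A's two filtered folds, for arbitrary accumulators
theorem fold_pair_eq (resp : List (String × String)) :
    ∀ (req : List String) (p m : List (String × String)),
      req.foldl
        (fun (s : List (String × String) × List (String × String)) h =>
          match resp.lookup h with
          | some v => (s.1 ++ [(h, v)], s.2)
          | none => (s.1, s.2 ++ [(h, "")]))
        (p, m)
      = ((req.filter (fun h => (resp.map Prod.fst).contains h)).foldl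
           (fun d h => d ++ [(h, ((resp.lookup h).getD ""))]) p,
         (req.filter (fun h => !((resp.map Prod.fst).contains h))).foldl
           (fun d h => d ++ [(h, "")]) m) := by
  intro req
  induction req with
  | nil => intro p m; simp
  | cons h t ih =>
      intro p m
      cases hv : resp.lookup h with
      | some v =>
          have hm : h ∈ resp.map Prod.fst := by
            rw [mem_keys_iff_lookup_isSome, hv]; rfl
          simp [hm, hv, ih]
      | none =>
          have hm : h ∉ resp.map Prod.fst := by
            rw [mem_keys_iff_lookup_isSome, hv]; simp
          simp [hm, hv, ih]

-- ===== VERDICT (by name: the statement is the Claim_ definition above) =====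
theorem analyseHeaders_spec : Claim_equal_analyseHeaders := by
  intro req resp _
  unfold Spec_analyseHeaders analyseHeaders analyseHeaders_alt
  rw [fold_pair_eq resp req [] []]
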